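-- pv_equiv track=rewrite | github.com/0ctagon/ukulele | makedatabase.py | listAllArrangements
-- ===== SOURCE A (Python) =====
-- def listAllArrangements(notes, size):
--     if (size == 1):
--         arrangements = []
--         for i in range(len(notes)):
--             arrangements.append([notes[i]])
--         return arrangements
--     arrangements = []
--     for i in range(len(notes)):
--         firstNote = notes[i]
--         subArrangements = listAllArrangements(notes, size - 1)
--         for j in range(len(subArrangements)):
--             arrangement = subArrangements[j]
--             arrangement.append(firstNote)
--             arrangements.append(arrangement)
--     return arrangements
-- ===== SOURCE B (Python) =====
-- def listAllArrangements(notes, size):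
--     arrangements = [[]]
--     for _ in range(size):
--         arrangements = [sub + [note] for note in notes for sub in arrangements]
--     return arrangements
-- ===== Notes on version B (the rewrite author's own statement) =====
-- stated objective: simpler
-- what changed: Replaced A's recursion, which re-calls itself once per outer note and mutates sub-lists, with a single iterative bottom-up product build: start from [[]] and fold the extend-by-one-note step size times.
-- intended difference: For empty notes with size <= 0, A accidentally returns [] (its loop body never runs before recursing), while B returns [[]], the single length-0 arrangement, the intended product-of-length-0 value. — e.g. on listAllArrangements([], 0): A returns [], B returns [[]]
import Mathlib
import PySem

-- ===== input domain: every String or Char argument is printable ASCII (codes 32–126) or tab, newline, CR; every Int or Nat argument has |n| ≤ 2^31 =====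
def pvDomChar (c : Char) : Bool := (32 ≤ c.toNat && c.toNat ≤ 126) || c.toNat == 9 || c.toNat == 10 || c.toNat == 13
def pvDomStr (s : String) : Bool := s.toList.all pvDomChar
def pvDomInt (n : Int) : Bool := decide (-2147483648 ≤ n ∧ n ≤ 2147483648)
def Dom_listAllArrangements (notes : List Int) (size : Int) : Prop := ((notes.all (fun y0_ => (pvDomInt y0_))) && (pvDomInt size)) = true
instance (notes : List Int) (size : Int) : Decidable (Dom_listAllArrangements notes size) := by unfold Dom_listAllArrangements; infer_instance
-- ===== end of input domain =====

-- B replaces A's per-element re-recursion with a single iterative product build (bottom-up fold), a simpler one-pass formulation.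

-- ===== PORT A =====
-- Recursion on size is bounded by the fuel size.toNat (fuel 0 is exactly where Python
-- infinite-recurses for non-empty notes, and where its loop body never runs for empty notes).
def listAllArrangementsFuel (notes : List Int) (size : Int) (fuel : Nat) : List (List Int) :=
  match fuel with
  | 0 => []
  | f + 1 =>
    if size = 1 then
      -- for i in range(len(notes)): arrangements.append([notes[i]])
      notes.map (fun n => [n])
    else
      -- for i: firstNote = notes[i]; sub = listAllArrangements(notes, size-1); append firstNote to each
      -- the recursive result is loop-invariant: Python recomputes it per iteration only
      -- because it mutates the sub-lists; Lean lists are immutable, so one call per level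
      -- yields the same values (kernel-reducible)
      let subArrangements := listAllArrangementsFuel notes (size - 1) f
      (List.range notes.length).foldl
        (fun acc i =>
          let firstNote := notes.getD i 0  -- notes[i], i always in range
          acc ++ subArrangements.map (fun s => s ++ [firstNote])) []

def listAllArrangements (notes : List Int) (size : Int) : List (List Int) :=
  listAllArrangementsFuel notes size size.toNat

-- ===== PORT B =====
def listAllArrangements_alt (notes : List Int) (size : Int) : List (List Int) :=
  (List.range size.toNat).foldl
    (fun arrangements _ =>
      notes.flatMap (fun note => arrangements.map (fun sub => sub ++ [note]))) [[]]

-- ===== PRECONDITION & SPEC =====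
-- Pre_ excludes exactly size ≤ 0 with non-empty notes, where A infinite-recurses (RecursionError).
def Pre_listAllArrangements (notes : List Int) (size : Int) : Prop := 1 ≤ size ∨ notes = []
instance (notes : List Int) (size : Int) : Decidable (Pre_listAllArrangements notes size) := by unfold Pre_listAllArrangements; infer_instance
def pvWitness_listAllArrangements : List Int × Int := ([1, 2], 2)

-- For empty notes with size ≤ 0, A accidentally returns [] (its loop body never runs before recursing),
-- while B returns [[]], the single length-0 arrangement, which is the intended product-of-length-0 value.
def D_listAllArrangements (notes : List Int) (size : Int) : Prop := notes = [] ∧ size ≤ 0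
instance (notes : List Int) (size : Int) : Decidable (D_listAllArrangements notes size) := by unfold D_listAllArrangements; infer_instance

def Spec_listAllArrangements (notes : List Int) (size : Int) (out : List (List Int)) : Prop := ¬ D_listAllArrangements notes size → out = listAllArrangements_alt notes size
instance (notes : List Int) (size : Int) (out : List (List Int)) : Decidable (Spec_listAllArrangements notes size out) := by unfold Spec_listAllArrangements; infer_instance

def pvDiffWitness_listAllArrangements : List Int × Int := ([], 0)
def pvDiffWitnessOut_listAllArrangements : (List (List Int)) × (List (List Int)) := ([], [[]])

-- ===== CLAIM (what is proved, stated in full; the proofs are below) =====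
def Claim_unchanged_listAllArrangements : Prop := ∀ (notes : List Int) (size : Int), Dom_listAllArrangements notes size → Pre_listAllArrangements notes size → Spec_listAllArrangements notes size (listAllArrangements notes size)
def Claim_changed_listAllArrangements : Prop := Dom_listAllArrangements (pvDiffWitness_listAllArrangements.1) (pvDiffWitness_listAllArrangements.2) ∧ Pre_listAllArrangements (pvDiffWitness_listAllArrangements.1) (pvDiffWitness_listAllArrangements.2) ∧ D_listAllArrangements (pvDiffWitness_listAllArrangements.1) (pvDiffWitness_listAllArrangements.2) ∧ listAllArrangements (pvDiffWitness_listAllArrangements.1) (pvDiffWitness_listAllArrangements.2) = pvDiffWitnessOut_listAllArrangements.1 ∧ listAllArrangements_alt (pvDiffWitness_listAllArrangements.1) (pvDiffWitness_listAllArrangements.2) = pvDiffWitnessOut_listAllArrangements.2 ∧ pvDiffWitnessOut_listAllArrangements.1 ≠ pvDiffWitnessOut_listAllArrangements.2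
def Claim_exact_listAllArrangements : Prop := ∀ (notes : List Int) (size : Int), Dom_listAllArrangements notes size → Pre_listAllArrangements notes size → D_listAllArrangements notes size → listAllArrangements notes size ≠ listAllArrangements_alt notes size

-- ===== LEMMAS AND PROOFS =====

-- one product-building step shared by both characterisations
def pvStep (notes : List Int) (acc : List (List Int)) : List (List Int) :=
  notes.flatMap (fun note => acc.map (fun sub => sub ++ [note]))

lemma pvB_iterate (notes : List Int) : ∀ (k : Nat) (a : List (List Int)),
    (List.range k).foldl (fun acc _ => pvStep notes acc) a = (pvStep notes)^[k] a := by
  intro k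
  induction k with
  | zero => intro a; simp
  | succ n ih =>
    intro a
    rw [List.range_succ, List.foldl_append, ih, Function.iterate_succ_apply']
    simp

lemma pvRangeGetD (l : List Int) (g : Int → List (List Int)) :
    (List.range l.length).flatMap (fun i => g (l.getD i 0)) = l.flatMap g := by
  induction l with
  | nil => simp
  | cons a t ih =>
    rw [List.length_cons, List.range_succ_eq_map]
    simp only [List.flatMap_cons, List.flatMap_map, List.getD_cons_zero, List.getD_cons_succ]
    rw [ih]

lemma pvA_foldl_flatMap (notes : List Int) (sub : List (List Int)) :
    (List.range notes.length).foldl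
      (fun acc i => acc ++ sub.map (fun s => s ++ [notes.getD i 0])) []
    = (List.range notes.length).flatMap (fun i => sub.map (fun s => s ++ [notes.getD i 0])) := by
  rw [PySem.List.foldl_append_eq_flatMap]
  simp

lemma pvA_iterate (notes : List Int) : ∀ (f : Nat) (size : Int), size = (f : Int) + 1 →
    listAllArrangementsFuel notes size (f + 1) = (pvStep notes)^[f + 1] [[]] := by
  intro f
  induction f with
  | zero =>
    intro size hs
    simp only [listAllArrangementsFuel, hs]
    norm_num
    simp [pvStep]
    induction notes with
    | nil => rfl
    | cons a t ih => simp_all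
  | succ n ih =>
    intro size hs
    have hne : ¬ size = 1 := by omega
    rw [listAllArrangementsFuel, if_neg hne]
    rw [pvA_foldl_flatMap, pvRangeGetD notes
      (fun fn => (listAllArrangementsFuel notes (size - 1) (n + 1)).map (fun s => s ++ [fn]))]
    rw [ih (size - 1) (by omega), Function.iterate_succ_apply', Function.iterate_succ_apply',
      Function.iterate_succ_apply']
    rfl

lemma pvMain (notes : List Int) (size : Int) (h : 1 ≤ size) :
    listAllArrangements notes size = listAllArrangements_alt notes size := by
  unfold listAllArrangements listAllArrangements_alt
  have hk : ∃ f : Nat, size.toNat = f + 1 := ⟨size.toNat - 1, by omega⟩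
  obtain ⟨f, hf⟩ := hk
  have hs : size = (f : Int) + 1 := by omega
  rw [hf, pvA_iterate notes f size hs]
  rw [show (fun (arrangements : List (List Int)) (_ : Nat) =>
      notes.flatMap (fun note => arrangements.map (fun sub => sub ++ [note])))
    = (fun acc _ => pvStep notes acc) from rfl]
  rw [pvB_iterate notes (f + 1) [[]]]

-- ===== VERDICT (by name: the statements are the Claim_ definitions above) =====
theorem listAllArrangements_spec : Claim_unchanged_listAllArrangements := by
  intro notes size _ hpre hnd
  rcases hpre with h1 | hnil
  · exact pvMain notes size h1
  · unfold D_listAllArrangements at hnd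
    have h1 : 1 ≤ size := by
      by_contra h
      exact hnd ⟨hnil, by omega⟩
    exact pvMain notes size h1

theorem listAllArrangements_changed : Claim_changed_listAllArrangements := by
  unfold Claim_changed_listAllArrangements; decide

theorem listAllArrangements_tight : Claim_exact_listAllArrangements := by
  intro notes size _ _ hd
  obtain ⟨hnil, hle⟩ := hd
  subst hnil
  have h0 : size.toNat = 0 := by omega
  simp [listAllArrangements, listAllArrangements_alt, h0, listAllArrangementsFuel]
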